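-- pv_equiv track=rewrite | github.com/michaelsedbon/PhD | experiments/EXP_001/fetch_kegg_reactions.py | parse_kegg_entry
-- ===== SOURCE A (Python) =====
-- def parse_kegg_entry(text: str) -> dict:
--     """Parse a KEGG flat-file entry into sections."""
--     sections = {}
--     current_key = None
--     current_lines = []
--     for line in text.split("\n"):
--         if line.startswith("///"):
--             break
--         if line and not line[0].isspace():
--             if current_key:
--                 sections[current_key] = "\n".join(current_lines)
--             parts = line.split(None, 1)
--             current_key = parts[0]
--             current_lines = [parts[1] if len(parts) > 1 else ""]
--         elif current_key:
--             current_lines.append(line.strip())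
--     if current_key:
--         sections[current_key] = "\n".join(current_lines)
--     return sections
-- ===== SOURCE B (Python) =====
-- def _is_header(line: str) -> bool:
--     return bool(line) and not line[0].isspace()
--
--
-- def _before_terminator(lines):
--     kept = []
--     for line in lines:
--         if line.startswith("///"):
--             return kept
--         kept.append(line)
--     return kept
--
--
-- def _blocks(lines):
--     n = len(lines)
--     blocks = []
--     i = 0
--     while i < n:
--         if _is_header(lines[i]):
--             j = i + 1
--             while j < n and not _is_header(lines[j]):
--                 j += 1
--             blocks.append((lines[i], lines[i + 1:j]))
--             i = j
--         else:
--             i += 1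
--     return blocks
--
--
-- def parse_kegg_entry(text: str) -> dict:
--     """Parse a KEGG flat-file entry into sections."""
--     sections = {}
--     for header, body in _blocks(_before_terminator(text.split("\n"))):
--         parts = header.split(None, 1)
--         first = parts[1] if len(parts) > 1 else ""
--         sections[parts[0]] = "\n".join([first] + [l.strip() for l in body])
--     return sections
-- ===== Notes on version B (the rewrite author's own statement) =====
-- stated objective: alternative
-- what changed: B replaces A's single accumulator pass (current_key/current_lines with interleaved dict writes) by three separate phases: truncate the line list at the first '///' line, find each header block's boundaries by index scanning (inner while advances past continuation lines, blocks are taken as slices), then map each (header, body) block to one dict entry.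
import Mathlib
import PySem

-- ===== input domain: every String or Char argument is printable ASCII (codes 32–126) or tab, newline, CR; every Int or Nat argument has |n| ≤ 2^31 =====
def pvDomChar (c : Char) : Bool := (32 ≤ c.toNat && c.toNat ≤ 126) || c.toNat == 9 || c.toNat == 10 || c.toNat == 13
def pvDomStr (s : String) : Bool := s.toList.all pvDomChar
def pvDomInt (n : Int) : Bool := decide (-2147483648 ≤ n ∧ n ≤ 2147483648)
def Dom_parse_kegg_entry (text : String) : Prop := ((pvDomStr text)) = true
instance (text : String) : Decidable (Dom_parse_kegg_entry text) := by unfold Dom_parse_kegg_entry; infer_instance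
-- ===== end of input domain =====

-- B restructures A's single accumulator pass into three phases (truncate at '///', find
-- header-block boundaries by index scanning, map each block to a dict entry); objective:
-- alternative decomposition, same cost.

-- ===== PORT A =====

-- flush: Python's `if current_key: sections[current_key] = "\n".join(current_lines)`
-- (truthiness: None and "" are both falsy)
def pvFlush (sections : PySem.Dict String String) (curKey : Option String)
    (curLines : List String) : PySem.Dict String String :=
  match curKey with
  | none => sections
  | some k => if k = "" then sections else sections.insert k (PySem.Str.join "\n" curLines)

-- `line and not line[0].isspace()`
def pvANonSpaceStart (line : String) : Bool :=
  match line.toList with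
  | [] => false
  | c :: _ => !PySem.Chars.isspace c

-- the `for line in text.split("\n")` loop with its break and the trailing flush
def pvALoop (sections : PySem.Dict String String) (curKey : Option String)
    (curLines : List String) : List String → PySem.Dict String String
  | [] => pvFlush sections curKey curLines
  | line :: rest =>
    if PySem.Str.startswith line "///" then pvFlush sections curKey curLines
    else if pvANonSpaceStart line then
      let sections' := pvFlush sections curKey curLines
      let parts := PySem.Str.split₀Max line 1   -- line.split(None, 1)
      -- parts[0] (nonempty since line has a non-space first char, so the list is nonempty)
      pvALoop sections' (some (PySem.List.pyGetD parts 0 ""))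
        [PySem.List.pyGetD parts 1 ""] rest    -- parts[1] if len(parts) > 1 else ""
    else
      match curKey with
      | some k =>
        if k = "" then pvALoop sections (some k) curLines rest
        else pvALoop sections (some k) (curLines ++ [PySem.Str.strip line]) rest
      | none => pvALoop sections none curLines rest

def parse_kegg_entry (text : String) : List (String × String) :=
  (pvALoop PySem.Dict.empty none [] ((PySem.Str.split? text "\n").getD [])).items

-- ===== PORT B =====

-- _is_header: bool(line) and not line[0].isspace()
def pvIsHeader (line : String) : Bool :=
  match line.toList with
  | [] => false
  | c :: _ => !PySem.Chars.isspace c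

-- _before_terminator: collect lines until one startswith '///'
def pvCutGo (kept : List String) : List String → List String
  | [] => kept
  | line :: rest =>
    if PySem.Str.startswith line "///" then kept else pvCutGo (kept ++ [line]) rest

def pvCut (lines : List String) : List String := pvCutGo [] lines

-- inner while: advance j up to the next header (lines[j] always in range, guard j < n)
def pvScanEnd (lines : List String) (j : Nat) : Nat :=
  if _h : j < lines.length then
    if pvIsHeader (lines.getD j "") then j else pvScanEnd lines (j + 1)
  else j
termination_by lines.length - j

theorem le_pvScanEnd (lines : List String) (j : Nat) : j ≤ pvScanEnd lines j := by
  unfold pvScanEnd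
  split
  · split
    · exact le_refl _
    · exact le_trans (Nat.le_succ j) (le_pvScanEnd lines (j + 1))
  · exact le_refl _
termination_by lines.length - j

-- outer while of _blocks (lines[i] in range by the guard; lines[i+1:j] is a Python slice)
def pvBlocksGo (lines : List String) (i : Nat)
    (blocks : List (String × List String)) : List (String × List String) :=
  if _h : i < lines.length then
    if pvIsHeader (lines.getD i "") then
      -- j := the inner while's final index, computed once in Python
      pvBlocksGo lines (pvScanEnd lines (i + 1))
        (blocks ++ [(lines.getD i "",
          PySem.List.slice lines (some ((i : Int) + 1)) (some ((pvScanEnd lines (i + 1) : Nat) : Int)))])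
    else pvBlocksGo lines (i + 1) blocks
  else blocks
termination_by lines.length - i
decreasing_by
  · have := le_pvScanEnd lines (i + 1); omega
  · omega

def pvBlocks (lines : List String) : List (String × List String) := pvBlocksGo lines 0 []

def parse_kegg_entry_alt (text : String) : List (String × String) :=
  ((pvBlocks (pvCut ((PySem.Str.split? text "\n").getD []))).foldl
    (fun d hb =>
      let parts := PySem.Str.split₀Max hb.1 1
      d.insert (PySem.List.pyGetD parts 0 "")
        (PySem.Str.join "\n" (PySem.List.pyGetD parts 1 "" :: hb.2.map PySem.Str.strip)))
    PySem.Dict.empty).items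

-- ===== PRECONDITION & SPEC =====
def Spec_parse_kegg_entry (text : String) (out : List (String × String)) : Prop := out = parse_kegg_entry_alt text
instance (text : String) (out : List (String × String)) : Decidable (Spec_parse_kegg_entry text out) := by unfold Spec_parse_kegg_entry; infer_instance

-- ===== CLAIM (what is proved, stated in full; the proofs are below) =====
def Claim_equal_parse_kegg_entry : Prop := ∀ (text : String), Dom_parse_kegg_entry text → Spec_parse_kegg_entry text (parse_kegg_entry text)

-- ===== LEMMAS AND PROOFS =====

-- the fold body of B, named for the proofs
def pvBStep (d : PySem.Dict String String) (hb : String × List String) : PySem.Dict String String :=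
  let parts := PySem.Str.split₀Max hb.1 1
  d.insert (PySem.List.pyGetD parts 0 "")
    (PySem.Str.join "\n" (PySem.List.pyGetD parts 1 "" :: hb.2.map PySem.Str.strip))

-- structural characterisation of B's index-scanning _blocks
def pvBlocksSpec : List String → List (String × List String)
  | [] => []
  | l :: ls =>
    if pvIsHeader l then
      (l, ls.takeWhile (fun x => !pvIsHeader x)) :: pvBlocksSpec (ls.dropWhile (fun x => !pvIsHeader x))
    else pvBlocksSpec ls
termination_by ls => ls.length
decreasing_by
  · exact Nat.lt_succ_of_le (List.length_dropWhile_le _ _)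
  · exact Nat.lt_succ_of_le (le_refl _)

theorem pvCutGo_eq (lines kept : List String) :
    pvCutGo kept lines = kept ++ lines.takeWhile (fun l => !PySem.Str.startswith l "///") := by
  induction lines generalizing kept with
  | nil => simp [pvCutGo]
  | cons l ls ih =>
    simp only [pvCutGo, List.takeWhile_cons]
    cases h : PySem.Str.startswith l "///" with
    | true => simp
    | false => simp [ih]

theorem pvCut_eq (lines : List String) :
    pvCut lines = lines.takeWhile (fun l => !PySem.Str.startswith l "///") := by
  simp [pvCut, pvCutGo_eq]

theorem pvCut_no_term (lines : List String) :
    ∀ l ∈ pvCut lines, PySem.Str.startswith l "///" = false := by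
  intro l hl
  rw [pvCut_eq] at hl
  have := List.mem_takeWhile_imp hl
  simpa using this

-- A's loop only reads the prefix before the first '///' line
theorem pvALoop_cut (lines : List String) :
    ∀ d ck cl, pvALoop d ck cl lines = pvALoop d ck cl (pvCut lines) := by
  induction lines with
  | nil => intro d ck cl; simp [pvCut, pvCutGo]
  | cons l ls ih =>
    intro d ck cl
    cases h : PySem.Str.startswith l "///" with
    | true =>
      have hcut : pvCut (l :: ls) = [] := by rw [pvCut_eq, List.takeWhile_cons, h]; simp
      rw [hcut]
      simp only [pvALoop]
      rw [h]
      simp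
    | false =>
      have hcut : pvCut (l :: ls) = l :: pvCut ls := by
        rw [pvCut_eq, pvCut_eq, List.takeWhile_cons, h]; simp
      rw [hcut]
      simp only [pvALoop]
      rw [h]
      simp only [Bool.false_eq_true, if_false]
      cases hm : pvANonSpaceStart l with
      | true =>
        exact ih _ _ _
      | false =>
        simp only [Bool.false_eq_true, if_false]
        match ck with
        | none => exact ih _ _ _
        | some k =>
          by_cases hk : k = ""
          · simp only [hk]; exact ih _ _ _
          · simp only [if_neg hk]; exact ih _ _ _

-- a header line's first split(None,1) piece is a nonempty string
theorem pvHeader_key_ne (line : String) (h : pvIsHeader line = true) :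
    PySem.List.pyGetD (PySem.Str.split₀Max line 1) 0 "" ≠ "" := by
  unfold pvIsHeader at h
  rcases hc : line.toList with _ | ⟨c, r⟩
  · rw [hc] at h; simp at h
  · rw [hc] at h
    simp only [Bool.not_eq_true'] at h
    rw [PySem.List.pyGetD_ofNat']
    unfold PySem.Str.split₀Max PySem.Chars.split₀Max
    rw [hc]
    have h1 : ¬((1 : Int) < 0) := by decide
    rw [if_neg h1]
    have hdw : List.dropWhile PySem.Chars.isspace (c :: r) = c :: r := by
      simp [h]
    have htw : List.takeWhile (fun x => !PySem.Chars.isspace x) (c :: r) =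
        c :: List.takeWhile (fun x => !PySem.Chars.isspace x) r := by
      simp [h]
    rw [show ((c :: r).length + 1) = (r.length + 1) + 1 from by simp]
    rw [show ((1 : Int).toNat) = 1 from rfl]
    simp only [PySem.Chars.split₀Max.go, hdw]
    cases hds : List.dropWhile PySem.Chars.isspace
        (List.dropWhile (fun x => !PySem.Chars.isspace x) (c :: r)) with
    | nil => simp [htw]
    | cons d ds => simp [htw]

-- A's test `line and not line[0].isspace()` is B's _is_header
theorem pvCond_eq : pvANonSpaceStart = pvIsHeader := rfl

-- main invariant, the open-section state: A's loop from (sections, some k, current_lines)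
-- equals flushing k with the remaining continuation lines and folding B's remaining blocks
theorem pvALoop_some : ∀ (lines : List String),
    (∀ l ∈ lines, PySem.Str.startswith l "///" = false) →
    ∀ d k cl, k ≠ "" →
      pvALoop d (some k) cl lines =
        List.foldl pvBStep
          (d.insert k (PySem.Str.join "\n" (cl ++ (lines.takeWhile (fun x => !pvIsHeader x)).map PySem.Str.strip)))
          (pvBlocksSpec (lines.dropWhile (fun x => !pvIsHeader x))) := by
  intro lines
  induction lines with
  | nil => intro _ d k cl hk; simp [pvALoop, pvFlush, pvBlocksSpec, hk]
  | cons l ls ih =>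
    intro hn d k cl hk
    have hl : PySem.Str.startswith l "///" = false := hn l (by simp)
    have hn' : ∀ x ∈ ls, PySem.Str.startswith x "///" = false := fun x hx => hn x (by simp [hx])
    rw [List.takeWhile_cons, List.dropWhile_cons]
    simp only [pvALoop]
    rw [hl]
    simp only [Bool.false_eq_true, if_false]
    cases hh : pvANonSpaceStart l with
    | true =>
      have hhI : pvIsHeader l = true := by rw [← pvCond_eq]; exact hh
      simp only [hhI, Bool.not_true, Bool.false_eq_true, if_false]
      rw [ih hn' _ _ _ (pvHeader_key_ne l hhI)]
      rw [pvBlocksSpec]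
      simp only [hhI]
      simp [pvFlush, hk, pvBStep]
    | false =>
      have hhI : pvIsHeader l = false := by rw [← pvCond_eq]; exact hh
      simp only [Bool.false_eq_true, if_false, if_neg hk, hhI, Bool.not_false]
      rw [ih hn' _ _ _ hk]
      simp [List.append_assoc]

-- closed-section state: A's loop from (sections, None, []) folds B's blocks
theorem pvALoop_none : ∀ (lines : List String),
    (∀ l ∈ lines, PySem.Str.startswith l "///" = false) →
    ∀ d, pvALoop d none [] lines = List.foldl pvBStep d (pvBlocksSpec lines) := by
  intro lines
  induction lines with
  | nil => intro _ d; simp [pvALoop, pvFlush, pvBlocksSpec]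
  | cons l ls ih =>
    intro hn d
    have hl : PySem.Str.startswith l "///" = false := hn l (by simp)
    have hn' : ∀ x ∈ ls, PySem.Str.startswith x "///" = false := fun x hx => hn x (by simp [hx])
    simp only [pvALoop]
    rw [hl]
    simp only [Bool.false_eq_true, if_false]
    cases hh : pvANonSpaceStart l with
    | true =>
      have hhI : pvIsHeader l = true := by rw [← pvCond_eq]; exact hh
      rw [pvALoop_some ls hn' _ _ _ (pvHeader_key_ne l hhI)]
      rw [pvBlocksSpec]
      simp only [hhI]
      simp [pvFlush, pvBStep]
    | false =>
      have hhI : pvIsHeader l = false := by rw [← pvCond_eq]; exact hh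
      simp only [Bool.false_eq_true, if_false]
      rw [pvBlocksSpec]
      simp only [hhI, Bool.false_eq_true, if_false]
      exact ih hn' d

-- pvScanEnd lands exactly past the continuation lines
theorem pvScanEnd_eq (lines : List String) (j : Nat) :
    pvScanEnd lines j = j + ((lines.drop j).takeWhile (fun x => !pvIsHeader x)).length := by
  unfold pvScanEnd
  split
  · rename_i hj
    have hdrop : lines.drop j = lines[j] :: lines.drop (j + 1) := List.drop_eq_getElem_cons hj
    have hget : lines.getD j "" = lines[j] := List.getD_eq_getElem lines "" hj
    split
    · rename_i hh
      rw [hget] at hh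
      rw [hdrop, List.takeWhile_cons]
      simp [hh]
    · rename_i hh
      rw [hget] at hh
      simp only [Bool.not_eq_true] at hh
      rw [pvScanEnd_eq lines (j + 1), hdrop, List.takeWhile_cons]
      simp [hh]; omega
  · rename_i hj
    rw [List.drop_eq_nil_of_le (by omega)]
    simp
termination_by lines.length - j

-- dropping the takeWhile prefix is dropWhile (used to step pvBlocksGo past a block)
theorem pvDrop_len_takeWhile {α : Type} (p : α → Bool) (l : List α) :
    l.drop (l.takeWhile p).length = l.dropWhile p := by
  induction l with
  | nil => rfl
  | cons x xs ih => by_cases h : p x <;> simp [h, ih]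

-- B's index-scanning pvBlocksGo realises pvBlocksSpec on the suffix from i
theorem pvBlocksGo_eq (lines : List String) (i : Nat) (blocks : List (String × List String)) :
    pvBlocksGo lines i blocks = blocks ++ pvBlocksSpec (lines.drop i) := by
  unfold pvBlocksGo
  split
  · rename_i hi
    have hdrop : lines.drop i = lines[i] :: lines.drop (i + 1) := List.drop_eq_getElem_cons hi
    have hget : lines.getD i "" = lines[i] := List.getD_eq_getElem lines "" hi
    split
    · rename_i hh
      rw [hget] at hh ⊢
      have hj : pvScanEnd lines (i + 1) =
          (i + 1) + ((lines.drop (i + 1)).takeWhile (fun x => !pvIsHeader x)).length := pvScanEnd_eq lines (i + 1)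
      have hslice : PySem.List.slice lines (some ((i : Int) + 1)) (some ((pvScanEnd lines (i + 1) : Nat) : Int)) =
          (lines.drop (i + 1)).takeWhile (fun x => !pvIsHeader x) := by
        have hcast : ((i : Int) + 1) = ((i + 1 : Nat) : Int) := by push_cast; ring
        rw [hcast, hj, PySem.List.slice_natCast, Nat.add_sub_cancel_left]
        exact (List.prefix_iff_eq_take.mp (List.takeWhile_prefix _)).symm
      have hdw : lines.drop (pvScanEnd lines (i + 1)) =
          (lines.drop (i + 1)).dropWhile (fun x => !pvIsHeader x) := by
        rw [hj, ← List.drop_drop]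
        exact pvDrop_len_takeWhile _ _
      rw [hslice, pvBlocksGo_eq lines (pvScanEnd lines (i + 1)) _, hdw, hdrop, pvBlocksSpec]
      simp [hh]
    · rename_i hh
      rw [hget] at hh
      simp only [Bool.not_eq_true] at hh
      rw [pvBlocksGo_eq lines (i + 1) blocks, hdrop, pvBlocksSpec]
      simp [hh]
  · rename_i hi
    rw [List.drop_eq_nil_of_le (by omega)]
    simp [pvBlocksSpec]
termination_by lines.length - i
decreasing_by
  · have := le_pvScanEnd lines (i + 1); omega
  · omega

-- ===== VERDICT (by name: the statement is the Claim_ definition above) =====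
theorem parse_kegg_entry_spec : Claim_equal_parse_kegg_entry := by
  intro text _
  unfold Spec_parse_kegg_entry parse_kegg_entry parse_kegg_entry_alt
  rw [pvALoop_cut]
  rw [pvALoop_none _ (pvCut_no_term _)]
  rw [pvBlocks, pvBlocksGo_eq]
  simp only [List.nil_append, List.drop_zero]
  rfl
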